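-- pv_equiv track=rewrite | github.com/enkiv2/constrained-writer | autosuggest.py | corpus2bigrams
-- ===== SOURCE A (Python) =====
-- def corpus2bigrams(text):
-- 	world={}
-- 	chars=",./<>?'\":;`~!@#$%^&*()_+-=\\|[]{}\r\n\t"
-- 	for i in range(0, len(chars)):
-- 		text=text.replace(chars[i], " ")
-- 	lastWord=""
-- 	for w in text.split():
-- 		word=w.lower()
-- 		if(not(lastWord in world)):
-- 			world[lastWord]={}
-- 		if(not(word in world[lastWord])):
-- 			world[lastWord][word]=1
-- 		else:
-- 			world[lastWord][word]+=1
-- 		lastWord=word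
-- 	return world
-- ===== SOURCE B (Python) =====
-- def corpus2bigrams(text):
--     # phase 0: same separator stripping as the task demands
--     for ch in ",./<>?'\":;`~!@#$%^&*()_+-=\\|[]{}\r\n\t":
--         text = text.replace(ch, " ")
--     words = [w.lower() for w in text.split()]
--     # phase 1: flat counter over adjacent (prev, cur) pairs (leading "" prefix)
--     counts = {}
--     for pair in zip([""] + words, words):
--         counts[pair] = counts.get(pair, 0) + 1
--     # phase 2: nest the flat counts into dict-of-dicts
--     world = {}
--     for (prev, cur), n in counts.items():
--         world.setdefault(prev, {})[cur] = n
--     return world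
-- ===== Notes on version B (the rewrite author's own statement) =====
-- stated objective: alternative
-- what changed: Instead of threading a lastWord state and updating the nested dict inside one loop, B forms the adjacent (prev,cur) pairs with zip, tallies them into one flat counter dict in a first pass, and nests that counter into the dict-of-dicts in a second pass.
import Mathlib
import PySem

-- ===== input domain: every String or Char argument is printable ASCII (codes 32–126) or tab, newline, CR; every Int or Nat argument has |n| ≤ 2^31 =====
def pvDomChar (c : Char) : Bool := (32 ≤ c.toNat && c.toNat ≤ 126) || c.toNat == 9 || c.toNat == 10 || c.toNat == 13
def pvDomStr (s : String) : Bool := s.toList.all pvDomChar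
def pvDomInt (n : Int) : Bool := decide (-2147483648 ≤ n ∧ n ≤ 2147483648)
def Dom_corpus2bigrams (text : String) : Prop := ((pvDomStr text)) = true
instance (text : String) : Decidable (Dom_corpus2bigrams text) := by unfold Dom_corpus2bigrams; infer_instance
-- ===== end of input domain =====

-- B replaces A's single stateful loop (lastWord threaded through nested-dict updates) by a
-- two-phase decomposition: zip adjacent word pairs, tally them in a flat counter, then nest.

-- the separator string both versions strip
def pvSeps : String := ",./<>?'\":;`~!@#$%^&*()_+-=\\|[]{}\r\n\t"

-- ===== PORT A =====
-- A's loop body: lower the word, ensure world[lastWord] exists, bump world[lastWord][word]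
def corpus2bigramsStep (st : PySem.Dict String (PySem.Dict String Int) × String) (w : String) :
    PySem.Dict String (PySem.Dict String Int) × String :=
  let word := PySem.Str.lower w
  let world := st.1
  let lastWord := st.2
  let world := if !world.contains lastWord then world.insert lastWord PySem.Dict.empty else world
  let inner := world.getD lastWord PySem.Dict.empty
  let world :=
    if !inner.contains word then world.insert lastWord (inner.insert word 1)
    else world.insert lastWord (inner.insert word (inner.getD word 0 + 1))
  (world, word)

def corpus2bigrams (text : String) : List (String × List (String × Int)) :=
  -- for i in range(0, len(chars)): text = text.replace(chars[i], " ")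
  -- (chars[i] ported as pyGetD with an unused default: i is always in range)
  let text := (PySem.List.pyRange 0 (PySem.List.len pvSeps.toList)).foldl
    (fun t j => PySem.Str.replace t (String.mk [PySem.List.pyGetD pvSeps.toList j ' ']) " ") text
  let world := ((PySem.Str.split₀ text).foldl corpus2bigramsStep (PySem.Dict.empty, "")).1
  world.items.map (fun p => (p.1, p.2.items))

-- ===== PORT B =====
def corpus2bigrams_alt (text : String) : List (String × List (String × Int)) :=
  -- same separator stripping, iterating the characters directly
  let text := pvSeps.toList.foldl (fun t c => PySem.Str.replace t (String.mk [c]) " ") text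
  let words := (PySem.Str.split₀ text).map PySem.Str.lower
  -- phase 1: flat counter over zip([""] + words, words)
  let counts := (List.zip ("" :: words) words).foldl
    (fun d p => d.insert p (d.getD p 0 + 1)) (PySem.Dict.empty : PySem.Dict (String × String) Int)
  -- phase 2: nest: world.setdefault(prev, {})[cur] = n
  let world := counts.items.foldl
    (fun w q =>
      let w1 := w.setdefault q.1.1 PySem.Dict.empty
      w1.insert q.1.1 ((w1.getD q.1.1 PySem.Dict.empty).insert q.1.2 q.2))
    (PySem.Dict.empty : PySem.Dict String (PySem.Dict String Int))
  world.items.map (fun p => (p.1, p.2.items))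

-- ===== PRECONDITION & SPEC =====
def Spec_corpus2bigrams (text : String) (out : List (String × List (String × Int))) : Prop := out = corpus2bigrams_alt text
instance (text : String) (out : List (String × List (String × Int))) : Decidable (Spec_corpus2bigrams text out) := by unfold Spec_corpus2bigrams; infer_instance

-- ===== CLAIM (what is proved, stated in full; the proofs are below) =====
def Claim_equal_corpus2bigrams : Prop := ∀ (text : String), Dom_corpus2bigrams text → Spec_corpus2bigrams text (corpus2bigrams text)

-- ===== LEMMAS AND PROOFS =====

-- A's loop body, simplified: bump the nested count at (lastWord, word)
def pvBump (d : PySem.Dict String (PySem.Dict String Int)) (p : String × String) :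
    PySem.Dict String (PySem.Dict String Int) :=
  d.insert p.1 ((d.getD p.1 PySem.Dict.empty).insert p.2
    ((d.getD p.1 PySem.Dict.empty).getD p.2 0 + 1))

-- B's nesting loop body, simplified: set the nested value at (prev, cur) to n
def pvNest (w : PySem.Dict String (PySem.Dict String Int)) (q : (String × String) × Int) :
    PySem.Dict String (PySem.Dict String Int) :=
  w.insert q.1.1 ((w.getD q.1.1 PySem.Dict.empty).insert q.1.2 q.2)

theorem pvStep_eq (st : PySem.Dict String (PySem.Dict String Int) × String) (w : String) :
    corpus2bigramsStep st w = (pvBump st.1 (st.2, PySem.Str.lower w), PySem.Str.lower w) := by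
  obtain ⟨d, l⟩ := st
  simp only [corpus2bigramsStep, pvBump]
  by_cases hc : d.contains l = true
  · simp only [hc, Bool.not_true, Bool.false_eq_true, if_false]
    by_cases hw : (d.getD l PySem.Dict.empty).contains (PySem.Str.lower w) = true
    · simp [hw]
    · simp only [Bool.not_eq_true] at hw
      simp [hw, PySem.Dict.getD_of_not_contains _ _ hw]
  · simp only [Bool.not_eq_true] at hc
    simp only [hc, Bool.not_false, if_true]
    rw [PySem.Dict.getD_insert_self, PySem.Dict.getD_of_not_contains _ _ hc]
    simp [PySem.Dict.contains_empty, PySem.Dict.insert_insert_self, PySem.Dict.getD_empty]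

theorem pvNest_eq (w : PySem.Dict String (PySem.Dict String Int)) (q : (String × String) × Int) :
    (let w1 := w.setdefault q.1.1 PySem.Dict.empty
     w1.insert q.1.1 ((w1.getD q.1.1 PySem.Dict.empty).insert q.1.2 q.2)) = pvNest w q := by
  simp only [pvNest]
  by_cases hc : w.contains q.1.1 = true
  · rw [PySem.Dict.setdefault_of_contains _ _ hc]
  · simp only [Bool.not_eq_true] at hc
    rw [PySem.Dict.setdefault_of_not_contains _ _ hc, PySem.Dict.getD_insert_self,
      PySem.Dict.insert_insert_self, PySem.Dict.getD_of_not_contains _ _ hc]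

-- A's whole word loop = folding pvBump over the adjacent lowered pairs, leading "" included
theorem pvFold_fst (ws : List String) (d : PySem.Dict String (PySem.Dict String Int)) (l : String) :
    (ws.foldl corpus2bigramsStep (d, l)).1
      = (List.zip (l :: ws.map PySem.Str.lower) (ws.map PySem.Str.lower)).foldl pvBump d := by
  induction ws generalizing d l with
  | nil => simp
  | cons w ws ih =>
    rw [List.foldl_cons, pvStep_eq]
    simp only [List.map_cons, List.zip_cons_cons, List.foldl_cons]
    exact ih _ _

-- the nested counts after A's loop are exactly the pair counts
theorem pvCountInv (ps : List (String × String)) (a b : String) :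
    ((ps.foldl pvBump PySem.Dict.empty).getD a PySem.Dict.empty).getD b 0 = ps.count (a, b) := by
  induction ps using List.reverseRecOn with
  | nil => simp [PySem.Dict.getD_empty]
  | append_singleton ps p ih =>
    obtain ⟨pa, pb⟩ := p
    rw [List.foldl_append]
    simp only [List.foldl_cons, List.foldl_nil, pvBump, List.count_append]
    by_cases h1 : a = pa
    · subst h1
      rw [PySem.Dict.getD_insert_self]
      by_cases h2 : b = pb
      · subst h2
        rw [PySem.Dict.getD_insert_self, ih]
        simp
      · rw [PySem.Dict.getD_insert_of_ne _ _ _ h2, ih]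
        simp [Ne.symm h2]
    · rw [PySem.Dict.getD_insert_of_ne _ _ _ h1, ih]
      simp [Ne.symm h1]

theorem pvMemInnerNest (L : List ((String × String) × Int)) (a b : String)
    (h : (a, b) ∈ L.map (·.1)) :
    b ∈ ((L.foldl pvNest PySem.Dict.empty).getD a PySem.Dict.empty).keys := by
  induction L using List.reverseRecOn with
  | nil => simp at h
  | append_singleton L x ih =>
    obtain ⟨⟨xa, xb⟩, xn⟩ := x
    rw [List.foldl_append]
    simp only [List.foldl_cons, List.foldl_nil, pvNest]
    simp only [List.map_append, List.mem_append, List.map_cons, List.map_nil,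
      List.mem_cons] at h
    by_cases h1 : a = xa
    · subst h1
      rw [PySem.Dict.getD_insert_self, PySem.Dict.mem_keys_insert]
      rcases h with h | h
      · exact Or.inr (ih h)
      · rcases h with h | h
        · exact Or.inl (congrArg Prod.snd h)
        · exact absurd h (by simp)
    · rw [PySem.Dict.getD_insert_of_ne _ _ _ h1]
      rcases h with h | h
      · exact ih h
      · rcases h with h | h
        · exact absurd (congrArg Prod.fst h) h1
        · exact absurd h (by simp)

-- two inserts at distinct keys commute when the first key is already present
theorem pvInsert_comm {κ ν : Type} [BEq κ] [LawfulBEq κ] (d : PySem.Dict κ ν) (k k' : κ)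
    (v v' : ν) (hk : d.contains k = true) (hne : k' ≠ k) :
    (d.insert k v).insert k' v' = (d.insert k' v').insert k v := by
  apply PySem.Dict.ext
  by_cases hk' : d.contains k' = true
  · rw [PySem.Dict.items_insert_of_contains _ _ (by simp [PySem.Dict.contains_insert, hk']),
      PySem.Dict.items_insert_of_contains _ _ hk,
      PySem.Dict.items_insert_of_contains _ _ (by simp [PySem.Dict.contains_insert, hk]),
      PySem.Dict.items_insert_of_contains _ _ hk']
    simp only [List.map_map]
    apply List.map_congr_left
    intro p _
    simp only [Function.comp_apply]
    by_cases h1 : p.1 = k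
    · simp [h1, Ne.symm hne]
    · by_cases h2 : p.1 = k'
      · simp [h2, hne]
      · simp [h1, h2]
  · rw [PySem.Dict.items_insert_of_not_contains _ _ (by simp [PySem.Dict.contains_insert, hk', hne]),
      PySem.Dict.items_insert_of_contains _ _ hk,
      PySem.Dict.items_insert_of_contains _ _ (by simp [PySem.Dict.contains_insert, hk]),
      PySem.Dict.items_insert_of_not_contains _ _ (by simp [hk'])]
    simp only [List.map_append]
    simp [hne]

-- bumping an already-present nested key commutes with setting any other nested slot
theorem pvBump_nest_comm (w : PySem.Dict String (PySem.Dict String Int)) (a b : String)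
    (q : (String × String) × Int) (h : b ∈ ((w.getD a PySem.Dict.empty).keys))
    (hne : q.1 ≠ (a, b)) :
    pvBump (pvNest w q) (a, b) = pvNest (pvBump w (a, b)) q := by
  obtain ⟨⟨qa, qb⟩, qn⟩ := q
  have ha : w.contains a = true := by
    by_contra hc
    simp only [Bool.not_eq_true] at hc
    rw [PySem.Dict.getD_of_not_contains _ _ hc] at h
    simp [PySem.Dict.keys_empty] at h
  have hb : (w.getD a PySem.Dict.empty).contains b = true :=
    (PySem.Dict.contains_iff_mem_keys _ _).mpr h
  simp only [pvBump, pvNest]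
  by_cases h1 : qa = a
  · subst h1
    have hbb : qb ≠ b := by intro hx; exact hne (by rw [hx])
    rw [PySem.Dict.getD_insert_self, PySem.Dict.getD_insert_self,
      PySem.Dict.getD_insert_of_ne _ _ _ (Ne.symm hbb),
      PySem.Dict.insert_insert_self, PySem.Dict.insert_insert_self]
    rw [pvInsert_comm _ b qb _ _ hb hbb]
  · rw [PySem.Dict.getD_insert_of_ne _ _ _ (fun hx => h1 hx.symm),
      PySem.Dict.getD_insert_of_ne _ _ _ h1,
      pvInsert_comm _ a qa _ _ ha h1]

-- incrementing one entry of the flat items list = bumping the nested dict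
theorem pvInc (L : List ((String × String) × Int)) (hnd : (L.map (·.1)).Nodup)
    (p : String × String) (hp : p ∈ L.map (·.1)) :
    (L.map (fun q => if q.1 = p then (q.1, q.2 + 1) else q)).foldl pvNest PySem.Dict.empty
      = pvBump (L.foldl pvNest PySem.Dict.empty) p := by
  induction L using List.reverseRecOn with
  | nil => simp at hp
  | append_singleton L x ih =>
    simp only [List.map_append, List.map_cons, List.map_nil] at hp hnd
    rw [List.map_append, List.foldl_append, List.foldl_append]
    simp only [List.map_cons, List.map_nil, List.foldl_cons, List.foldl_nil]
    have hnd' : (L.map (·.1)).Nodup := (List.nodup_append.mp hnd).1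
    by_cases hx : x.1 = p
    · -- the bumped entry is the last one; the rest of the list is untouched
      have hpL : p ∉ L.map (·.1) := by
        have := (List.nodup_append.mp hnd).2.2
        intro hmem
        exact this p hmem x.1 (List.mem_singleton.mpr rfl) (by rw [hx])
      have hmap : L.map (fun q => if q.1 = p then (q.1, q.2 + 1) else q) = L := by
        conv_rhs => rw [← List.map_id L]
        apply List.map_congr_left
        intro q hq
        have : q.1 ≠ p := fun hh => hpL (hh ▸ List.mem_map_of_mem hq)
        simp [this]
      rw [hmap]
      obtain ⟨⟨xa, xb⟩, xn⟩ := x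
      simp only at hx
      subst hx
      simp only [if_true, pvNest, pvBump]
      simp [PySem.Dict.getD_insert_self, PySem.Dict.insert_insert_self]
    · -- the bumped entry is inside L; x is untouched and commutes with the bump
      have hpL : p ∈ L.map (·.1) := by
        rcases List.mem_append.mp hp with h | h
        · exact h
        · exact absurd (List.mem_singleton.mp h).symm hx
      have hxmap : (if x.1 = p then (x.1, x.2 + 1) else x) = x := by simp [hx]
      rw [hxmap, ih hnd' hpL]
      obtain ⟨pa, pb⟩ := p
      exact (pvBump_nest_comm _ pa pb x (pvMemInnerNest L pa pb hpL) hx).symm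

-- MAIN: nesting the flat counter of the pairs = A's direct nested counting
theorem pvMain (ps : List (String × String)) :
    ((PySem.Set.ofList ps).map (fun k => (k, (ps.count k : Int)))).foldl pvNest PySem.Dict.empty
      = ps.foldl pvBump PySem.Dict.empty := by
  induction ps using List.reverseRecOn with
  | nil => simp [PySem.Set.ofList_nil]
  | append_singleton ps p ih =>
    rw [List.foldl_append, List.foldl_cons, List.foldl_nil, PySem.Set.ofList_append_singleton]
    by_cases hp : p ∈ ps
    · rw [PySem.Set.add_of_mem ((PySem.Set.mem_ofList _ _).mpr hp)]
      have hstep : (PySem.Set.ofList ps).map (fun k => (k, ((ps ++ [p]).count k : Int)))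
          = ((PySem.Set.ofList ps).map (fun k => (k, (ps.count k : Int)))).map
              (fun q => if q.1 = p then (q.1, q.2 + 1) else q) := by
        rw [List.map_map]
        apply List.map_congr_left
        intro k hk
        simp only [Function.comp_apply]
        by_cases hkp : k = p
        · subst hkp
          simp [List.count_append]
        · have : (p == k) = false := by simp [Ne.symm hkp]
          simp [hkp, List.count_append, List.count_singleton, this]
      rw [hstep, pvInc _ (by
          have hkeys : List.map ((fun x => x.1) ∘ fun k => ((k : String × String), (ps.count k : Int)))
              (PySem.Set.ofList ps) = PySem.Set.ofList ps := by
            simp [Function.comp_def]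
          rw [List.map_map, hkeys]
          exact PySem.Set.nodup_ofList ps) p
        (by
          have hkeys : List.map ((fun x => x.1) ∘ fun k => ((k : String × String), (ps.count k : Int)))
              (PySem.Set.ofList ps) = PySem.Set.ofList ps := by
            simp [Function.comp_def]
          rw [List.map_map, hkeys]
          exact (PySem.Set.mem_ofList ps p).mpr hp), ih]
    · rw [PySem.Set.add_of_not_mem (fun h => hp ((PySem.Set.mem_ofList _ _).mp h)),
        List.map_append, List.foldl_append]
      have hcongr : (PySem.Set.ofList ps).map (fun k => (k, ((ps ++ [p]).count k : Int)))
          = (PySem.Set.ofList ps).map (fun k => (k, (ps.count k : Int))) := by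
        apply List.map_congr_left
        intro k hk
        have hkp : k ≠ p := fun h => hp (h ▸ (PySem.Set.mem_ofList _ _).mp hk)
        have : (p == k) = false := by simp [Ne.symm hkp]
        simp [List.count_append, List.count_singleton, this]
      rw [hcongr, ih]
      simp only [List.map_cons, List.map_nil, List.foldl_cons, List.foldl_nil]
      have hc1 : ((ps ++ [p]).count p : Int) = 1 := by
        rw [List.count_append]
        simp [List.count_eq_zero_of_not_mem hp]
      rw [hc1]
      simp only [pvNest, pvBump]
      rw [pvCountInv, List.count_eq_zero_of_not_mem hp]
      norm_num

-- ===== VERDICT (by name: the statement is the Claim_ definition above) =====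
theorem corpus2bigrams_spec : Claim_equal_corpus2bigrams := by
  intro text _
  unfold Spec_corpus2bigrams corpus2bigrams corpus2bigrams_alt
  rw [PySem.List.foldl_pyRange_pyGetD pvSeps.toList ' '
    (fun t c => PySem.Str.replace t (String.mk [c]) " ") text (by norm_num)]
  simp only [Int.toNat_zero, List.drop_zero]
  rw [pvFold_fst]
  rw [PySem.Dict.foldl_insert_getD_add_one_eq_counter]
  rw [PySem.Dict.items_counter]
  have hnest : (fun (w : PySem.Dict String (PySem.Dict String Int))
      (q : (String × String) × Int) =>
      let w1 := w.setdefault q.1.1 PySem.Dict.empty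
      w1.insert q.1.1 ((w1.getD q.1.1 PySem.Dict.empty).insert q.1.2 q.2)) = pvNest := by
    funext w q
    exact pvNest_eq w q
  rw [hnest, pvMain]
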